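-- pv_equiv track=rewrite | github.com/e95r/syte | backend/utils_seeding.py | _base_lane_order
-- ===== SOURCE A (Python) =====
-- from typing import Dict, List, Tuple
--
-- class SeedingError(Exception):
--     """Raised when seeding cannot be completed."""
--
-- def _base_lane_order(lane_count: int) -> List[int]:
--     if lane_count <= 0:
--         raise SeedingError("Количество дорожек должно быть положительным")
--     center_left = (lane_count + 1) // 2
--     if lane_count % 2 == 0:
--         center_left = lane_count // 2
--         center_right = center_left + 1
--     else:
--         center_right = center_left
--     order = []
--     offset = 0
--     while len(order) < lane_count:
--         left = center_left - offset
--         right = center_right + offset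
--         if offset == 0:
--             order.append(center_left)
--             if center_right != center_left:
--                 order.append(center_right)
--         else:
--             if left >= 1:
--                 order.append(left)
--             if right <= lane_count:
--                 order.append(right)
--         offset += 1
--     return order[:lane_count]
-- ===== SOURCE B (Python) =====
-- class SeedingError(Exception):
--     """Raised when seeding cannot be completed."""
--
-- def _base_lane_order(lane_count):
--     if lane_count <= 0:
--         raise SeedingError("Количество дорожек должно быть положительным")
--     c = (lane_count + 1) // 2
--     s = 1 if lane_count % 2 == 0 else -1
--     return [c + ((i + 1) // 2) * (s if i % 2 else -s) for i in range(lane_count)]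
-- ===== Notes on version B (the rewrite author's own statement) =====
-- stated objective: simpler
-- what changed: Replaces A's outward-stepping while loop with append/bounds bookkeeping by a single closed-form list comprehension computing the lane at each position directly from its index.
import Mathlib
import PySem

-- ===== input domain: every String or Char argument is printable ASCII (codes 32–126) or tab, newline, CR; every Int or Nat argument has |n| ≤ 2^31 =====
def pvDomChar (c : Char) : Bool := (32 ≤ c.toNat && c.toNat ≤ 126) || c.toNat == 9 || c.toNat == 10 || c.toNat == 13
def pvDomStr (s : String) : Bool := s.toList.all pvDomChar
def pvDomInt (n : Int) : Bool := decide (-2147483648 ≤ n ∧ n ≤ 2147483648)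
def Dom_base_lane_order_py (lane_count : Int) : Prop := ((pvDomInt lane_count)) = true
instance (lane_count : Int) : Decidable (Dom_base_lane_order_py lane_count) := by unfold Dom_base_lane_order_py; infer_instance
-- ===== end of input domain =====

-- B replaces A's outward-stepping while loop by a single closed-form list comprehension
-- (lane at position i computed directly from i); objective: simpler, same asymptotic cost.

-- ===== PORT A =====
-- the while loop of A, as fuel recursion (fuel only makes the same computation total;
-- lane_count iterations always suffice)
def aLoopA (lane_count center_left center_right : Int) (order : List Int) (offset : Int) : Nat → List Int
  | 0 => order
  | Nat.succ fuel =>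
    if (order.length : Int) < lane_count then
      let left := center_left - offset
      let right := center_right + offset
      let order' :=
        if offset = 0 then
          order ++ ([center_left] ++ (if center_right ≠ center_left then [center_right] else []))
        else
          (let o1 := if 1 ≤ left then order ++ [left] else order
           if right ≤ lane_count then o1 ++ [right] else o1)
      aLoopA lane_count center_left center_right order' (offset + 1) fuel
    else order

def base_lane_order_py (lane_count : Int) : List Int :=
  if lane_count ≤ 0 then []   -- Python raises SeedingError here; excluded by Pre_
  else
    let cl0 := PySem.Int.floordiv (lane_count + 1) 2
    let cs : Int × Int :=
      if PySem.Int.mod lane_count 2 = 0 then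
        (PySem.Int.floordiv lane_count 2, PySem.Int.floordiv lane_count 2 + 1)
      else (cl0, cl0)
    PySem.List.slice (aLoopA lane_count cs.1 cs.2 [] 0 (lane_count.toNat + 1)) none (some lane_count)

-- ===== PORT B =====
def base_lane_order_py_alt (lane_count : Int) : List Int :=
  if lane_count ≤ 0 then []   -- Python raises SeedingError here; excluded by Pre_
  else
    let c := PySem.Int.floordiv (lane_count + 1) 2
    let s : Int := if PySem.Int.mod lane_count 2 = 0 then 1 else -1
    (PySem.List.pyRange 0 lane_count 1).map
      (fun i => c + PySem.Int.floordiv (i + 1) 2 * (if PySem.Int.mod i 2 ≠ 0 then s else -s))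

-- ===== PRECONDITION & SPEC =====
-- Pre_: Python A raises SeedingError exactly when lane_count <= 0
def Pre_base_lane_order_py (lane_count : Int) : Prop := 0 < lane_count
instance (lane_count : Int) : Decidable (Pre_base_lane_order_py lane_count) := by unfold Pre_base_lane_order_py; infer_instance
def pvWitness_base_lane_order_py : Int := (5)

def Spec_base_lane_order_py (lane_count : Int) (out : List Int) : Prop := out = base_lane_order_py_alt lane_count
instance (lane_count : Int) (out : List Int) : Decidable (Spec_base_lane_order_py lane_count out) := by unfold Spec_base_lane_order_py; infer_instance

-- ===== CLAIM (what is proved, stated in full; the proofs are below) =====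
def Claim_equal_base_lane_order_py : Prop := ∀ (lane_count : Int), Dom_base_lane_order_py lane_count → Pre_base_lane_order_py lane_count → Spec_base_lane_order_py lane_count (base_lane_order_py lane_count)

-- ===== LEMMAS AND PROOFS =====

-- the common closed form: lane at 0-based position i
def laneG (c s : Int) (i : Nat) : Int :=
  c + (((i + 1) / 2 : Nat) : Int) * (if i % 2 = 1 then s else -s)

lemma laneG_two_mul_sub_one (c : Int) (s : Int) (k : Nat) (hk : 1 ≤ k) :
    laneG c s (2 * k - 1) = c + k * s := by
  unfold laneG
  have h1 : (2 * k - 1) % 2 = 1 := by omega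
  have h2 : (2 * k - 1 + 1) / 2 = k := by omega
  rw [h1, h2]
  simp

lemma laneG_two_mul (c : Int) (s : Int) (k : Nat) :
    laneG c s (2 * k) = c + k * (-s) := by
  unfold laneG
  have h1 : (2 * k) % 2 = 0 := by omega
  have h2 : (2 * k + 1) / 2 = k := by omega
  rw [h1, h2]
  norm_num

lemma laneG_two_mul_add_one (c : Int) (s : Int) (k : Nat) :
    laneG c s (2 * k + 1) = c + (k + 1) * s := by
  unfold laneG
  have h1 : (2 * k + 1) % 2 = 1 := by omega
  have h2 : (2 * k + 1 + 1) / 2 = k + 1 := by omega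
  rw [h1, h2]
  push_cast
  ring

-- B equals the closed form
lemma alt_eq_map (n : Int) (hn : 0 < n) :
    base_lane_order_py_alt n =
      (List.range n.toNat).map
        (laneG (PySem.Int.floordiv (n + 1) 2)
               (if PySem.Int.mod n 2 = 0 then 1 else -1)) := by
  unfold base_lane_order_py_alt
  rw [if_neg (by omega)]
  rw [PySem.List.pyRange_one]
  rw [List.map_map]
  have hsub : (n - 0).toNat = n.toNat := by omega
  rw [hsub]
  apply List.map_congr_left
  intro k _
  simp only [Function.comp]
  unfold laneG
  have hfd : PySem.Int.floordiv ((0 : Int) + k + 1) 2 = (((k + 1) / 2 : Nat) : Int) := by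
    have : ((0 : Int) + k + 1) = ((k + 1 : Nat) : Int) := by push_cast; ring
    rw [this]
    exact_mod_cast PySem.Int.floordiv_natCast (k + 1) 2
  have hmod : PySem.Int.mod ((0 : Int) + k) 2 = ((k % 2 : Nat) : Int) := by
    have : ((0 : Int) + k) = ((k : Nat) : Int) := by ring
    rw [this]
    exact_mod_cast PySem.Int.mod_natCast k 2
  rw [hfd, hmod]
  by_cases hk : k % 2 = 1
  · rw [if_pos (by exact_mod_cast by omega), if_pos hk]
  · rw [if_neg (by exact_mod_cast by omega), if_neg hk]

-- A's loop, even case: lane_count = 2c, centres (c, c+1), sign +1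
lemma loop_even (c : Int) (hc : 1 ≤ c) :
    ∀ (fuel k : Nat), 1 ≤ k → (k : Int) ≤ c → c.toNat - k < fuel →
      aLoopA (2 * c) c (c + 1) ((List.range (2 * k)).map (laneG c 1)) (k : Int) fuel
        = (List.range (2 * c.toNat)).map (laneG c 1) := by
  intro fuel
  induction fuel with
  | zero => intro k _ _ h; omega
  | succ fuel ih =>
    intro k hk1 hkc hfuel
    unfold aLoopA
    simp only [List.length_map, List.length_range]
    by_cases hlt : ((2 * k : Nat) : Int) < 2 * c
    · rw [if_pos hlt]
      have hklt : (k : Int) < c := by push_cast at hlt; omega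
      rw [if_neg (by exact_mod_cast by omega : ¬ ((k : Int) = 0))]
      rw [if_pos (by omega : (1 : Int) ≤ c - k)]
      rw [if_pos (by omega : c + 1 + (k : Int) ≤ 2 * c)]
      have hord : ((List.range (2 * k)).map (laneG c 1) ++ [c - (k : Int)]) ++ [c + 1 + (k : Int)]
          = (List.range (2 * (k + 1))).map (laneG c 1) := by
        have h1 : 2 * (k + 1) = (2 * k + 1) + 1 := by omega
        rw [h1, List.range_succ, List.range_succ]
        simp only [List.map_append, List.map_cons, List.map_nil]
        rw [laneG_two_mul c 1 k, laneG_two_mul_add_one c 1 k]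
        simp only [List.append_assoc]
        norm_num
        constructor <;> ring
      rw [hord]
      have hcast : (k : Int) + 1 = ((k + 1 : Nat) : Int) := by push_cast; ring
      rw [hcast]
      exact ih (k + 1) (by omega) (by push_cast; omega) (by omega)
    · rw [if_neg hlt]
      have : k = c.toNat := by push_cast at hlt; omega
      rw [this]

-- A's loop, odd case: lane_count = 2c - 1, centres (c, c), sign -1
lemma loop_odd (c : Int) (hc : 1 ≤ c) :
    ∀ (fuel k : Nat), 1 ≤ k → (k : Int) ≤ c → c.toNat - k < fuel →
      aLoopA (2 * c - 1) c c ((List.range (2 * k - 1)).map (laneG c (-1))) (k : Int) fuel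
        = (List.range (2 * c.toNat - 1)).map (laneG c (-1)) := by
  intro fuel
  induction fuel with
  | zero => intro k _ _ h; omega
  | succ fuel ih =>
    intro k hk1 hkc hfuel
    unfold aLoopA
    simp only [List.length_map, List.length_range]
    by_cases hlt : ((2 * k - 1 : Nat) : Int) < 2 * c - 1
    · rw [if_pos hlt]
      have hklt : (k : Int) < c := by
        have : ((2 * k - 1 : Nat) : Int) = 2 * (k : Int) - 1 := by omega
        omega
      rw [if_neg (by exact_mod_cast by omega : ¬ ((k : Int) = 0))]
      rw [if_pos (by omega : (1 : Int) ≤ c - k)]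
      rw [if_pos (by omega : c + (k : Int) ≤ 2 * c - 1)]
      have hord : ((List.range (2 * k - 1)).map (laneG c (-1)) ++ [c - (k : Int)]) ++ [c + (k : Int)]
          = (List.range (2 * (k + 1) - 1)).map (laneG c (-1)) := by
        have h1 : 2 * (k + 1) - 1 = (2 * k - 1 + 1) + 1 := by omega
        have h2 : 2 * k - 1 + 1 = 2 * k := by omega
        rw [h1, List.range_succ, List.range_succ, h2]
        simp only [List.map_append, List.map_cons, List.map_nil]
        have h3 : (2 : Nat) * k - 1 = 2 * k - 1 := rfl
        rw [laneG_two_mul c (-1) k]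
        have h4 : laneG c (-1) (2 * k - 1) = c + (k : Int) * (-1) := laneG_two_mul_sub_one c (-1) k hk1
        rw [h4]
        simp only [List.append_assoc]
        norm_num
        omega
      rw [hord]
      have hcast : (k : Int) + 1 = ((k + 1 : Nat) : Int) := by push_cast; ring
      rw [hcast]
      exact ih (k + 1) (by omega) (by push_cast; omega) (by omega)
    · rw [if_neg hlt]
      have : k = c.toNat := by
        have : ((2 * k - 1 : Nat) : Int) = 2 * (k : Int) - 1 := by omega
        omega
      rw [this]

-- initial iteration + loop, even case
lemma even_case (c : Int) (hc : 1 ≤ c) :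
    PySem.List.slice (aLoopA (2 * c) c (c + 1) [] 0 ((2 * c).toNat + 1)) none (some (2 * c))
      = (List.range (2 * c).toNat).map (laneG c 1) := by
  have h1 : (2 * c).toNat + 1 = Nat.succ ((2 * c).toNat) := rfl
  rw [h1]
  unfold aLoopA
  rw [if_pos (by simp; omega)]
  have hstep : ∀ ord : List Int, ord = (List.range (2 * 1)).map (laneG c 1) →
      aLoopA (2 * c) c (c + 1) ord (0 + 1) (2 * c).toNat
        = (List.range (2 * c.toNat)).map (laneG c 1) := by
    intro ord hord
    rw [hord, show (0 : Int) + 1 = ((1 : Nat) : Int) by norm_num]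
    exact loop_even c hc ((2 * c).toNat) 1 (by omega) (by push_cast; omega) (by omega)
  show PySem.List.slice
      (aLoopA (2 * c) c (c + 1) ([] ++ ([c] ++ if c + 1 ≠ c then [c + 1] else []))
        (0 + 1) (2 * c).toNat) none (some (2 * c))
      = List.map (laneG c 1) (List.range (2 * c).toNat)
  rw [if_pos (by omega : c + 1 ≠ c)]
  rw [hstep _ (by unfold laneG; norm_num [show List.range (2*1) = [0,1] from by decide])]
  rw [PySem.List.slice_to ((List.range (2 * c.toNat)).map (laneG c 1)) (by omega : (0 : Int) ≤ 2 * c)]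
  rw [show (2 * c).toNat = 2 * c.toNat from by omega]
  exact List.take_of_length_le (by simp)

-- initial iteration + loop, odd case
lemma odd_case (c : Int) (hc : 1 ≤ c) :
    PySem.List.slice (aLoopA (2 * c - 1) c c [] 0 ((2 * c - 1).toNat + 1)) none (some (2 * c - 1))
      = (List.range (2 * c - 1).toNat).map (laneG c (-1)) := by
  have h1 : (2 * c - 1).toNat + 1 = Nat.succ ((2 * c - 1).toNat) := rfl
  rw [h1]
  unfold aLoopA
  rw [if_pos (by simp; omega)]
  have hstep : ∀ ord : List Int, ord = (List.range (2 * 1 - 1)).map (laneG c (-1)) →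
      aLoopA (2 * c - 1) c c ord (0 + 1) (2 * c - 1).toNat
        = (List.range (2 * c.toNat - 1)).map (laneG c (-1)) := by
    intro ord hord
    rw [hord, show (0 : Int) + 1 = ((1 : Nat) : Int) by norm_num]
    exact loop_odd c hc ((2 * c - 1).toNat) 1 (by omega) (by push_cast; omega) (by omega)
  show PySem.List.slice
      (aLoopA (2 * c - 1) c c ([] ++ ([c] ++ if c ≠ c then [c] else []))
        (0 + 1) (2 * c - 1).toNat) none (some (2 * c - 1))
      = List.map (laneG c (-1)) (List.range (2 * c - 1).toNat)
  rw [if_neg (by omega : ¬ (c ≠ c))]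
  rw [hstep _ (by unfold laneG; norm_num [show List.range (2*1-1) = [0] from by decide])]
  rw [PySem.List.slice_to ((List.range (2 * c.toNat - 1)).map (laneG c (-1))) (by omega : (0 : Int) ≤ 2 * c - 1)]
  rw [show (2 * c - 1).toNat = 2 * c.toNat - 1 from by omega]
  exact List.take_of_length_le (by simp)

-- ===== VERDICT (by name: the statement is the Claim_ definition above) =====
theorem base_lane_order_py_spec : Claim_equal_base_lane_order_py := by
  intro n _ hpre
  unfold Spec_base_lane_order_py
  have hn : 0 < n := hpre
  have hmod : PySem.Int.mod n 2 = n % 2 := PySem.Int.mod_eq_emod_of_pos (by omega)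
  have hfd1 : PySem.Int.floordiv (n + 1) 2 = (n + 1) / 2 :=
    PySem.Int.floordiv_eq_ediv_of_pos (by omega)
  have hfd2 : PySem.Int.floordiv n 2 = n / 2 :=
    PySem.Int.floordiv_eq_ediv_of_pos (by omega)
  rw [alt_eq_map n hn]
  by_cases hpar : PySem.Int.mod n 2 = 0
  · -- even
    have hemod : n % 2 = 0 := by rw [← hmod]; exact hpar
    have hc1 : 1 ≤ PySem.Int.floordiv n 2 := by rw [hfd2]; omega
    have h2c : n = 2 * PySem.Int.floordiv n 2 := by rw [hfd2]; omega
    have hceq : PySem.Int.floordiv (n + 1) 2 = PySem.Int.floordiv n 2 := by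
      rw [hfd1, hfd2]; omega
    rw [hceq, if_pos hpar]
    simp only [base_lane_order_py, if_neg (by omega : ¬ n ≤ 0), if_pos hpar]
    have key := even_case (PySem.Int.floordiv n 2) hc1
    rw [← h2c] at key
    exact key
  · -- odd
    have hemod : n % 2 = 1 := by
      rw [hmod] at hpar; omega
    have hc1 : 1 ≤ PySem.Int.floordiv (n + 1) 2 := by rw [hfd1]; omega
    have h2c : n = 2 * PySem.Int.floordiv (n + 1) 2 - 1 := by rw [hfd1]; omega
    rw [if_neg hpar]
    simp only [base_lane_order_py, if_neg (by omega : ¬ n ≤ 0), if_neg hpar]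
    have key := odd_case (PySem.Int.floordiv (n + 1) 2) hc1
    rw [← h2c] at key
    exact key
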